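-- pv_equiv track=rewrite | github.com/ilkaxd/Yandex-Practicum-Python-Developer | 4. Блок алгоритмов/3. Рекурсия и сортировки/task_16.py | block_count
-- ===== SOURCE A (Python) =====
-- from typing import DefaultDict
--
-- def block_count(s, n):
--     result = 0
--     min_value = 0
--     max_value = 0
--     conditions = DefaultDict(bool)
--     for i in range(0, n):
--         ch = s[i]
--         max_value = max(max_value, ch)
--
--         conditions[ch] = True
--
--         subset_condition = []
--         for j in range(min_value, max_value + 1):
--             subset_condition.append(conditions[j])
--         if all(subset_condition):
--             min_value = max_value
--             result += 1
--     return result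
-- ===== SOURCE B (Python) =====
-- def block_count(s, n):
--     result = 0
--     lo = 0
--     hi = 0
--     seen = set()
--     filled = 0  # number of distinct values of s seen so far that lie in [lo, hi]
--     for i in range(n):
--         ch = s[i]
--         if ch > hi:
--             hi = ch
--         if ch not in seen:
--             seen.add(ch)
--             if lo <= ch <= hi:
--                 filled += 1
--         if filled == hi - lo + 1:
--             result += 1
--             lo = hi
--             filled = 1
--     return result
-- ===== Notes on version B (the rewrite author's own statement) =====
-- stated objective: faster
-- what changed: A rebuilds and scans the whole value range [min,max] on every iteration; B keeps one incremental counter of distinct filled cells in the current window and closes a block when the counter equals the window width, removing the inner scan.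
import Mathlib
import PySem

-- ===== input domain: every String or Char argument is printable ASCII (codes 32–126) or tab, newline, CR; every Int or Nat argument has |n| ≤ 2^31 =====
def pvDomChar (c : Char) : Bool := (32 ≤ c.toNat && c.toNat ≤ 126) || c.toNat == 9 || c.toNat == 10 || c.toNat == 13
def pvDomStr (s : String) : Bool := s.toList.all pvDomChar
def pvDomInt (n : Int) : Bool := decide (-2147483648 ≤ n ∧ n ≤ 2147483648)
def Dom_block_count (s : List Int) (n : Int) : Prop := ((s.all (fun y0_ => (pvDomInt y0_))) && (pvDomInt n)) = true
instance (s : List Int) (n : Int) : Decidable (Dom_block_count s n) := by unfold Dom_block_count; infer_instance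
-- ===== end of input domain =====

-- B replaces A's per-iteration rebuild-and-scan of the whole range [min,max] by one
-- incrementally maintained counter of filled cells, closing a block when it equals the
-- window width (objective: faster).


-- ===== PORT A =====
-- the body of A's `for i in range(0, n)` loop (inner loop ported as a foldl building subset_condition)
def blockStepA (s : List Int) (st : Int × Int × Int × PySem.Dict Int Bool) (i : Int) :
    Int × Int × Int × PySem.Dict Int Bool :=
  match st with
  | (result, min_value, max_value, conditions) =>
    let ch := PySem.List.pyGetD s i 0
    let max_value2 := max max_value ch
    let conditions2 := conditions.insert ch true
    let subset_condition := (PySem.List.pyRange min_value (max_value2 + 1) 1).foldl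
      (fun acc j => acc ++ [conditions2.getD j false]) []
    if subset_condition.all id then (result + 1, max_value2, max_value2, conditions2)
    else (result, min_value, max_value2, conditions2)

def block_count (s : List Int) (n : Int) : Int :=
  ((PySem.List.pyRange 0 n 1).foldl (blockStepA s) (0, 0, 0, PySem.Dict.empty)).1

-- ===== PORT B =====
-- the body of B's single loop: window [lo, hi], set of seen values, incremental `filled` counter
def blockStepB (s : List Int) (st : Int × Int × Int × PySem.Set Int × Int) (i : Int) :
    Int × Int × Int × PySem.Set Int × Int :=
  match st with
  | (result, lo, hi, seen, filled) =>
    let ch := PySem.List.pyGetD s i 0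
    let hi2 := if ch > hi then ch else hi
    let p := if PySem.Set.contains seen ch then (seen, filled)
             else (PySem.Set.add seen ch, if lo ≤ ch ∧ ch ≤ hi2 then filled + 1 else filled)
    if p.2 = hi2 - lo + 1 then (result + 1, hi2, hi2, p.1, 1)
    else (result, lo, hi2, p.1, p.2)

def block_count_alt (s : List Int) (n : Int) : Int :=
  ((PySem.List.pyRange 0 n 1).foldl (blockStepB s) (0, 0, 0, PySem.Set.empty, 0)).1

-- ===== PRECONDITION & SPEC =====
-- Python A indexes s[i] for i in range(n) and raises IndexError when n > len(s) (B raises there too).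
def Pre_block_count (s : List Int) (n : Int) : Prop := n ≤ (s.length : Int)
instance (s : List Int) (n : Int) : Decidable (Pre_block_count s n) := by unfold Pre_block_count; infer_instance
def pvWitness_block_count : List Int × Int := ([1, 0, 2, 4, 3], 5)

def Spec_block_count (s : List Int) (n : Int) (out : Int) : Prop := out = block_count_alt s n
instance (s : List Int) (n : Int) (out : Int) : Decidable (Spec_block_count s n out) := by unfold Spec_block_count; infer_instance

-- ===== CLAIM (what is proved, stated in full; the proofs are below) =====
def Claim_equal_block_count : Prop := ∀ (s : List Int) (n : Int), Dom_block_count s n → Pre_block_count s n → Spec_block_count s n (block_count s n)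

-- ===== LEMMAS AND PROOFS =====

-- the coupling invariant between a state of A's loop and a state of B's loop
def BInv (a : Int × Int × Int × PySem.Dict Int Bool) (b : Int × Int × Int × PySem.Set Int × Int) : Prop :=
  a.1 = b.1 ∧ a.2.1 = b.2.1 ∧ a.2.2.1 = b.2.2.1 ∧ a.2.1 ≤ a.2.2.1 ∧
  (∀ k : Int, k ∈ b.2.2.2.1 ↔ a.2.2.2.getD k false = true) ∧
  (∀ k : Int, a.2.2.2.getD k false = true → k ≤ a.2.2.1) ∧
  b.2.2.2.2 = ((PySem.List.pyRange a.2.1 (a.2.2.1 + 1) 1).countP (fun j => a.2.2.2.getD j false) : Int)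

lemma cnt_congr (d d' : PySem.Dict Int Bool) (a b : Int)
    (h : ∀ j, a ≤ j → j < b → d'.getD j false = d.getD j false) :
    (PySem.List.pyRange a b 1).countP (fun j => d'.getD j false)
      = (PySem.List.pyRange a b 1).countP (fun j => d.getD j false) := by
  apply List.countP_congr
  intro j hj
  have := (PySem.List.mem_pyRange_one).1 hj
  simp [h j this.1 this.2]

lemma cnt_zero (d : PySem.Dict Int Bool) (a b : Int)
    (h : ∀ j, a ≤ j → j < b → d.getD j false = false) :
    (PySem.List.pyRange a b 1).countP (fun j => d.getD j false) = 0 := by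
  apply List.countP_eq_zero.2
  intro j hj
  have := (PySem.List.mem_pyRange_one).1 hj
  simp [h j this.1 this.2]

lemma cnt_insert (d : PySem.Dict Int Bool) (a b ch : Int) (ha : a ≤ ch) (hb : ch < b)
    (hf : d.getD ch false = false) :
    (PySem.List.pyRange a b 1).countP (fun j => (d.insert ch true).getD j false)
      = (PySem.List.pyRange a b 1).countP (fun j => d.getD j false) + 1 := by
  rw [PySem.List.pyRange_one_append a ch b ha (by omega),
      PySem.List.pyRange_one_cons hb]
  simp only [List.countP_append, List.countP_cons]
  have h1 := cnt_congr d (d.insert ch true) a ch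
    (fun j h1 h2 => PySem.Dict.getD_insert_of_ne d true false (show j ≠ ch by omega))
  have h2 := cnt_congr d (d.insert ch true) (ch+1) b
    (fun j h1 h2 => PySem.Dict.getD_insert_of_ne d true false (show j ≠ ch by omega))
  rw [h1, h2]
  simp [PySem.Dict.getD_insert_self, hf]
  omega

theorem step_preserves (s : List Int) (i : Int) (a : Int × Int × Int × PySem.Dict Int Bool)
    (b : Int × Int × Int × PySem.Set Int × Int) (h : BInv a b) :
    BInv (blockStepA s a i) (blockStepB s b i) := by
  obtain ⟨r, mn, mx, d⟩ := a
  obtain ⟨r', lo, hi, seen, f⟩ := b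
  obtain ⟨h1, h2, h3, hle, hmem, hbd, hf⟩ := h
  simp only at h1 h2 h3 hle hmem hbd hf
  subst h1 h2 h3
  simp only [blockStepA, blockStepB]
  set ch := PySem.List.pyGetD s i 0 with hch
  -- Python's `if ch > hi: hi = ch` computes max
  have hmax : (if ch > mx then ch else mx) = max mx ch := by
    rcases le_or_gt ch mx with hcm | hcm
    · simp [not_lt.2 hcm, max_eq_left hcm]
    · simp [hcm, max_eq_right hcm.le]
  rw [hmax]
  set M := max mx ch with hM
  have hmxM : mx ≤ M := le_max_left _ _
  have hchM : ch ≤ M := le_max_right _ _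
  have hmnM : mn ≤ M := le_trans hle hmxM
  set d' := d.insert ch true with hd'
  -- rewrite A's inner loop into an `all` over the range
  rw [PySem.List.foldl_append_singleton_eq_map (fun j => d'.getD j false), List.nil_append,
      List.all_map]
  simp only [Function.id_comp]
  -- common facts about d'
  have hgd' : ∀ j : Int, d'.getD j false = if j = ch then true else d.getD j false := by
    intro j
    by_cases hj : j = ch
    · subst hj; simp [hd', PySem.Dict.getD_insert_self]
    · simp [hd', hj, PySem.Dict.getD_insert_of_ne d true false hj]
  have hbd' : ∀ k : Int, d'.getD k false = true → k ≤ M := by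
    intro k hk
    rw [hgd'] at hk
    by_cases hkc : k = ch
    · omega
    · simp [hkc] at hk; exact le_trans (hbd k hk) hmxM
  -- the updated pair p of B, and the value of its counter
  by_cases hc : ch ∈ seen
  · -- ch already seen: d unchanged pointwise, M = mx, counter unchanged
    have hdtrue : d.getD ch false = true := (hmem ch).1 hc
    have hchmx : ch ≤ mx := hbd ch hdtrue
    have hMmx : M = mx := max_eq_left hchmx
    have hdeq : ∀ j : Int, d'.getD j false = d.getD j false := by
      intro j; rw [hgd']; by_cases hj : j = ch
      · subst hj; simp [hdtrue]
      · simp [hj]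
    have hcb : PySem.Set.contains seen ch = true := (PySem.Set.contains_iff seen ch).2 hc
    simp only [hcb, if_true]
    have hf' : f = ((PySem.List.pyRange mn (M + 1) 1).countP (fun j => d'.getD j false) : Int) := by
      rw [cnt_congr d d' mn (M+1) (fun j _ _ => hdeq j), hMmx, hf]
    have hmem' : ∀ k : Int, k ∈ seen ↔ d'.getD k false = true := by
      intro k; rw [hdeq]; exact hmem k
    -- branch equivalence
    have hlen : ((PySem.List.pyRange mn (M + 1) 1).length : Int) = M - mn + 1 := by
      rw [PySem.List.length_pyRange_one]; omega
    have hcle := List.countP_le_length (l := PySem.List.pyRange mn (M + 1) 1)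
      (p := fun j => d'.getD j false)
    have hall : ((PySem.List.pyRange mn (M + 1) 1).all (fun j => d'.getD j false) = true)
        ↔ (f = M - mn + 1) := by
      rw [List.all_eq_true, hf', ← hlen, ← List.countP_eq_length]
      constructor
      · intro hp; rw [hp]
      · intro hp; exact_mod_cast hp
    split_ifs with hA hB hB
    · exact ⟨rfl, rfl, rfl, le_refl _, hmem', fun k hk => hbd' k hk, by
        rw [PySem.List.pyRange_one_singleton]
        have : d'.getD M false = true := by
          rw [List.all_eq_true] at hA
          exact hA M ((PySem.List.mem_pyRange_one).2 ⟨hmnM, by omega⟩)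
        simp [this]⟩
    · exact absurd (hall.1 hA) hB
    · exact absurd (hall.2 hB) hA
    · exact ⟨rfl, rfl, rfl, hmnM, hmem', fun k hk => hbd' k hk, hf'⟩
  · -- ch is new
    have hdfalse : d.getD ch false = false := by
      have := hmem ch
      rcases hdv : d.getD ch false with _ | _
      · rfl
      · exact absurd (this.2 hdv) hc
    have hcb : PySem.Set.contains seen ch = false := by
      rcases hcv : PySem.Set.contains seen ch with _ | _
      · rfl
      · exact absurd ((PySem.Set.contains_iff seen ch).1 hcv) hc
    simp only [hcb, Bool.false_eq_true, if_false]
    have hmem' : ∀ k : Int, k ∈ PySem.Set.add seen ch ↔ d'.getD k false = true := by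
      intro k
      rw [PySem.Set.mem_add, hgd']
      by_cases hk : k = ch
      · simp [hk]
      · simp [hk, hmem k]
    -- counter update
    have hsplit : (PySem.List.pyRange mn (M + 1) 1).countP (fun j => d.getD j false)
        = (PySem.List.pyRange mn (mx + 1) 1).countP (fun j => d.getD j false) := by
      rw [PySem.List.pyRange_one_append mn (mx+1) (M+1) (by omega) (by omega),
          List.countP_append,
          cnt_zero d (mx+1) (M+1) (fun j hj1 _ => by
            rcases hdv : d.getD j false with _ | _
            · rfl
            · exact absurd (hbd j hdv) (by omega))]
      omega
    set fnew := (if mn ≤ ch ∧ ch ≤ M then f + 1 else f) with hfn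
    have hfnew : fnew
        = ((PySem.List.pyRange mn (M + 1) 1).countP (fun j => d'.getD j false) : Int) := by
      by_cases hcm : mn ≤ ch
      · rw [hfn, if_pos ⟨hcm, hchM⟩, hd', cnt_insert d mn (M+1) ch hcm (by omega) hdfalse,
            hsplit, hf]; push_cast; ring
      · rw [hfn, if_neg (by tauto)]
        have hMmx : M = mx := max_eq_left (by omega)
        rw [cnt_congr d d' mn (M+1) (fun j hj1 _ =>
              PySem.Dict.getD_insert_of_ne d true false (show j ≠ ch by omega)),
            hMmx, hf]
    have hlen : ((PySem.List.pyRange mn (M + 1) 1).length : Int) = M - mn + 1 := by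
      rw [PySem.List.length_pyRange_one]; omega
    have hall : ((PySem.List.pyRange mn (M + 1) 1).all (fun j => d'.getD j false) = true)
        ↔ (fnew = M - mn + 1) := by
      rw [List.all_eq_true, hfnew, ← hlen, ← List.countP_eq_length]
      constructor
      · intro hp; rw [hp]
      · intro hp; exact_mod_cast hp
    split_ifs with hA hB hB
    · exact ⟨rfl, rfl, rfl, le_refl _, hmem', fun k hk => hbd' k hk, by
        rw [PySem.List.pyRange_one_singleton]
        have : d'.getD M false = true := by
          rw [List.all_eq_true] at hA
          exact hA M ((PySem.List.mem_pyRange_one).2 ⟨hmnM, by omega⟩)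
        simp [this]⟩
    · exact absurd (hall.1 hA) hB
    · exact absurd (hall.2 hB) hA
    · exact ⟨rfl, rfl, rfl, hmnM, hmem', fun k hk => hbd' k hk, hfnew⟩

theorem fold_preserves (s : List Int) (l : List Int) (a : Int × Int × Int × PySem.Dict Int Bool)
    (b : Int × Int × Int × PySem.Set Int × Int) (h : BInv a b) :
    BInv (l.foldl (blockStepA s) a) (l.foldl (blockStepB s) b) := by
  induction l generalizing a b with
  | nil => exact h
  | cons x xs ih => exact ih _ _ (step_preserves s x a b h)

-- ===== VERDICT (by name: the statement is the Claim_ definition above) =====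
theorem block_count_spec : Claim_equal_block_count := by
  intro s n _ _
  unfold Spec_block_count block_count block_count_alt
  have h0 : BInv ((0, 0, 0, PySem.Dict.empty) : Int × Int × Int × PySem.Dict Int Bool)
      ((0, 0, 0, PySem.Set.empty, 0) : Int × Int × Int × PySem.Set Int × Int) := by
    refine ⟨rfl, rfl, rfl, le_refl _, ?_, ?_, ?_⟩ <;> simp [PySem.Set.empty, PySem.Dict.getD_empty]
  exact (fold_preserves s (PySem.List.pyRange 0 n 1) _ _ h0).1
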